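-- pv_equiv track=rewrite | github.com/Guptarohit2003/Python-refernce-files | september_long.py | calc_min
-- ===== SOURCE A (Python) =====
-- def calc_min(l):
--     mn = l[0]
--     mx=l[0]
--     mb = abs(l[0])
--     for i in range(len(l)):
--         mn = min(mn,l[i])
--         mx = max(mx,l[i])
--         mb = min(mb,abs(l[i]))
--     return min(mn*mx,mb*mb)
-- ===== SOURCE B (Python) =====
-- def calc_min(l):
--     s = sorted(l)
--     mn = s[0]
--     mx = s[-1]
--     # binary search for the first non-negative element (sign boundary)
--     lo = 0
--     hi = len(s)
--     while lo < hi: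
--         mid = (lo + hi) // 2
--         if s[mid] < 0:
--             lo = mid + 1
--         else:
--             hi = mid
--     # the minimum absolute value sits at the sign boundary
--     cands = []
--     if lo < len(s):
--         cands.append(s[lo])
--     if lo > 0:
--         cands.append(-s[lo - 1])
--     mb = min(cands)
--     return min(mn * mx, mb * mb)
-- ===== Notes on version B (the rewrite author's own statement) =====
-- stated objective: alternative
-- what changed: Instead of A's single accumulating scan maintaining running min/max/min-abs, B sorts the list once, reads min and max off the two ends, and binary-searches the sorted list for the sign boundary to obtain the minimal absolute value from the (at most two) boundary elements.
import Mathlib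
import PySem

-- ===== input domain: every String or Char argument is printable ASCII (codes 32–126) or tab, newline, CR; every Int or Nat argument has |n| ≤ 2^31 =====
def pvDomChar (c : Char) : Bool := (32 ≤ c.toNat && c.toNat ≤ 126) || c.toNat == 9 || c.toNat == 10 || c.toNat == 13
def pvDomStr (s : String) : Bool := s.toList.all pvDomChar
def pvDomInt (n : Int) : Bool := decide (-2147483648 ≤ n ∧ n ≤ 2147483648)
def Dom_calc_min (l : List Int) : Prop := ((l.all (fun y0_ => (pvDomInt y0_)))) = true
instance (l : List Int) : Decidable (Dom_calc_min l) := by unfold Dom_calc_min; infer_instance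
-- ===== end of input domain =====

-- B sorts the list (the ends give min/max) and binary-searches the sign boundary for the minimal
-- absolute value, instead of A's single accumulating scan (alternative algorithm, not faster).

-- ===== PORT A =====
def calc_min (l : List Int) : Int :=
  let mn := PySem.List.pyGetD l 0 0
  let mx := PySem.List.pyGetD l 0 0
  let mb := |PySem.List.pyGetD l 0 0|
  let s := (PySem.List.pyRange 0 l.length 1).foldl
    (fun (s : Int × Int × Int) i =>
      (min s.1 (PySem.List.pyGetD l i 0),
       max s.2.1 (PySem.List.pyGetD l i 0),
       min s.2.2 |PySem.List.pyGetD l i 0|))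
    (mn, mx, mb)
  min (s.1 * s.2.1) (s.2.2 * s.2.2)

-- ===== PORT B =====
-- the while-loop binary search of Source B (lo, hi stay non-negative, so Nat state is exact)
def pvBisect (s : List Int) (lo hi : Nat) : Nat :=
  if lo < hi then
    let mid := (lo + hi) / 2
    if PySem.List.pyGetD s (mid : Int) 0 < 0 then pvBisect s (mid + 1) hi
    else pvBisect s lo mid
  else lo
termination_by hi - lo
decreasing_by all_goals omega

def calc_min_alt (l : List Int) : Int :=
  let s := PySem.List.sorted l (fun y => y) false
  let mn := PySem.List.pyGetD s 0 0
  let mx := PySem.List.pyGetD s (-1) 0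
  let r := pvBisect s 0 s.length
  let cands : List Int :=
    (if r < s.length then [PySem.List.pyGetD s (r : Int) 0] else []) ++
    (if 0 < r then [-(PySem.List.pyGetD s ((r : Int) - 1) 0)] else [])
  let mb := (PySem.List.min? cands (fun y => y)).getD 0
  min (mn * mx) (mb * mb)

-- ===== PRECONDITION & SPEC =====
-- A raises IndexError on the empty list (l[0]); B also raises IndexError there (s[0]); both excluded.
def Pre_calc_min (l : List Int) : Prop := l ≠ []
instance (l : List Int) : Decidable (Pre_calc_min l) := by unfold Pre_calc_min; infer_instance
def pvWitness_calc_min : List Int := ([-3, 2, 5])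
def Spec_calc_min (l : List Int) (out : Int) : Prop := out = calc_min_alt l
instance (l : List Int) (out : Int) : Decidable (Spec_calc_min l out) := by unfold Spec_calc_min; infer_instance

-- ===== CLAIM (what is proved, stated in full; the proofs are below) =====
def Claim_equal_calc_min : Prop := ∀ (l : List Int), Dom_calc_min l → Pre_calc_min l → Spec_calc_min l (calc_min l)

-- ===== LEMMAS AND PROOFS =====
lemma pv_min_unique (zs : List Int) (a b : Int)
    (ha : a ∈ zs) (ha' : ∀ y ∈ zs, a ≤ y) (hb : b ∈ zs) (hb' : ∀ y ∈ zs, b ≤ y) : a = b :=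
  le_antisymm (ha' b hb) (hb' a ha)

lemma pv_foldl_step (t : List Int) (a b c : Int) :
    t.foldl (fun (s : Int × Int × Int) y => (min s.1 y, max s.2.1 y, min s.2.2 |y|)) (a, b, c)
      = (t.foldl min a, t.foldl max b, (t.map (fun x => |x|)).foldl min c) := by
  induction t generalizing a b c with
  | nil => rfl
  | cons h t ih => simp [List.foldl, ih]

-- binary-search invariant: on a list monotone in getD, pvBisect returns the sign boundary
lemma pv_bisect_spec (s : List Int)
    (hmono : ∀ p q : Nat, p ≤ q → q < s.length → s.getD p 0 ≤ s.getD q 0) :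
    ∀ fuel lo hi : Nat, hi - lo ≤ fuel → lo ≤ hi → hi ≤ s.length →
    (∀ i, i < lo → s.getD i 0 < 0) → (∀ i, hi ≤ i → i < s.length → 0 ≤ s.getD i 0) →
    (pvBisect s lo hi ≤ s.length) ∧
    (∀ i, i < pvBisect s lo hi → s.getD i 0 < 0) ∧
    (∀ i, pvBisect s lo hi ≤ i → i < s.length → 0 ≤ s.getD i 0) := by
  intro fuel
  induction fuel with
  | zero =>
    intro lo hi hf hle hlen hlo hhi
    have : lo = hi := by omega
    subst this
    rw [pvBisect]
    simp only [lt_irrefl, if_false]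
    exact ⟨by omega, hlo, hhi⟩
  | succ n ih =>
    intro lo hi hf hle hlen hlo hhi
    rw [pvBisect]
    by_cases h : lo < hi
    · simp only [h, if_true]
      have hmidlt : (lo + hi) / 2 < hi := by omega
      have hmidge : lo ≤ (lo + hi) / 2 := by omega
      have hgetD : PySem.List.pyGetD s (((lo + hi) / 2 : Nat) : Int) 0 = s.getD ((lo + hi) / 2) 0 :=
        PySem.List.pyGetD_natCast s _ 0
      by_cases hneg : PySem.List.pyGetD s (((lo + hi) / 2 : Nat) : Int) 0 < 0
      · simp only [hneg, if_true]
        refine ih ((lo + hi) / 2 + 1) hi (by omega) (by omega) hlen ?_ hhi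
        intro i hi'
        rcases Nat.lt_or_ge i lo with h' | h'
        · exact hlo i h'
        · calc s.getD i 0 ≤ s.getD ((lo + hi) / 2) 0 := hmono i _ (by omega) (by omega)
            _ < 0 := by rw [← hgetD]; exact hneg
      · simp only [hneg, if_false]
        refine ih lo ((lo + hi) / 2) (by omega) (by omega) (by omega) hlo ?_
        intro i hi' hi''
        rcases Nat.lt_or_ge i hi with h' | h'
        · calc (0 : Int) ≤ s.getD ((lo + hi) / 2) 0 := by rw [← hgetD]; omega
            _ ≤ s.getD i 0 := hmono _ i hi' (by omega)
        · exact hhi i h' hi''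
    · simp only [h, if_false]
      have : lo = hi := by omega
      subst this
      exact ⟨by omega, hlo, hhi⟩

-- ===== VERDICT (by name: the statement is the Claim_ definition above) =====
theorem calc_min_spec : Claim_equal_calc_min := by
  intro l _ hpre
  obtain ⟨x, t, rfl⟩ : ∃ x t, l = x :: t := by
    cases l with
    | nil => exact absurd rfl hpre
    | cons x t => exact ⟨x, t, rfl⟩
  unfold Spec_calc_min calc_min calc_min_alt
  dsimp only
  rw [PySem.List.foldl_pyRange_zero_pyGetD' (x :: t) 0
        (fun (s : Int × Int × Int) v => (min s.1 v, max s.2.1 v, min s.2.2 |v|))]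
  simp only [List.foldl, PySem.List.pyGetD_zero_cons, min_self, max_self]
  rw [pv_foldl_step]
  dsimp only
  -- A's aggregates
  set Lmn := t.foldl min x with hLmn
  set Lmx := t.foldl max x with hLmx
  set Lmb := (t.map (fun x => |x|)).foldl min |x| with hLmb
  -- the sorted list
  set s := PySem.List.sorted (x :: t) (fun y => y) false with hs
  have hperm : s.Perm (x :: t) := PySem.List.sorted_perm _ _ _
  have hsne : s ≠ [] := by
    intro h0
    have := hperm.length_eq
    simp [h0] at this
  have hlen : 0 < s.length := List.length_pos_iff.mpr hsne
  have hmem : ∀ y, y ∈ s ↔ y ∈ x :: t := fun y => hperm.mem_iff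
  have hmono : ∀ p q : Nat, p ≤ q → q < s.length → s.getD p 0 ≤ s.getD q 0 := by
    intro p q hpq hq
    have h1 : s.getD p 0 = s[p]'(by omega) := List.getD_eq_getElem s 0 (by omega)
    have h2 : s.getD q 0 = s[q] := List.getD_eq_getElem s 0 hq
    rw [h1, h2]
    exact PySem.List.sorted_id_getElem_mono (x :: t) hpq hq
  -- A's min aggregate = head of sorted
  have hmn : PySem.List.pyGetD s 0 0 = Lmn := by
    obtain ⟨m, rt, hmr⟩ : ∃ m rt, s = m :: rt := by
      cases hq : s with
      | nil => exact absurd hq hsne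
      | cons m rt => exact ⟨m, rt, rfl⟩
    have hmle : ∀ y ∈ x :: t, m ≤ y := by
      have := PySem.List.key_head_sorted_le (x :: t) (fun y => y) (hs.symm.trans hmr)
      simpa using fun y hy => this y hy
    have hmmem : m ∈ x :: t := (hmem m).mp (by simp [hmr])
    have hLmem : Lmn ∈ x :: t := by
      rcases PySem.List.foldl_min_mem t x with h | h
      · simp [hLmn, h]
      · simp [hLmn, h]
    have hLle : ∀ y ∈ x :: t, Lmn ≤ y := by
      intro y hy
      rcases List.mem_cons.mp hy with h | hy'
      · rw [h]; exact (PySem.List.foldl_min_le t x).1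
      · exact (PySem.List.foldl_min_le t x).2 y hy'
    rw [hmr, PySem.List.pyGetD_zero_cons]
    exact pv_min_unique (x :: t) m Lmn hmmem hmle hLmem hLle
  -- A's max aggregate = last of sorted
  have hmx : PySem.List.pyGetD s (-1) 0 = Lmx := by
    rw [PySem.List.pyGetD_neg_one s 0 hsne]
    have hlast : s.getLast hsne = s[s.length - 1]'(by omega) := List.getLast_eq_getElem hsne
    have hge : ∀ y ∈ x :: t, y ≤ s.getLast hsne := by
      intro y hy
      obtain ⟨i, hi, hiy⟩ := List.mem_iff_getElem.mp ((hmem y).mpr hy)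
      rw [hlast, ← hiy]
      have h1 : s.getD i 0 = s[i] := List.getD_eq_getElem s 0 hi
      have h2 : s.getD (s.length - 1) 0 = s[s.length - 1]'(by omega) :=
        List.getD_eq_getElem s 0 (by omega)
      rw [← h1, ← h2]
      exact hmono i (s.length - 1) (by omega) (by omega)
    have hgmem : s.getLast hsne ∈ x :: t := (hmem _).mp (List.getLast_mem hsne)
    have hLmem : Lmx ∈ x :: t := by
      rcases PySem.List.foldl_max_mem t x with h | h
      · simp [hLmx, h]
      · simp [hLmx, h]
    have hLge : ∀ y ∈ x :: t, y ≤ Lmx := by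
      intro y hy
      rcases List.mem_cons.mp hy with h | hy'
      · rw [h]; exact (PySem.List.le_foldl_max t x).1
      · exact (PySem.List.le_foldl_max t x).2 y hy'
    exact le_antisymm (hLge _ hgmem) (hge Lmx hLmem)
  -- A's min-abs aggregate: membership and lower-bound facts
  have habs : ∀ y, y ∈ (x :: t).map (fun y => |y|) ↔ y ∈ s.map (fun y => |y|) := by
    intro y
    exact ((hperm.map (fun y => |y|)).mem_iff).symm
  have hLbmem : Lmb ∈ s.map (fun y => |y|) := by
    rw [← habs, hLmb]
    rcases PySem.List.foldl_min_mem (t.map (fun y => |y|)) |x| with h | h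
    · simp [h]
    · simp only [List.map_cons, List.mem_cons]; exact Or.inr h
  have hLble : ∀ y ∈ s.map (fun y => |y|), Lmb ≤ y := by
    intro y hy
    rw [← habs] at hy
    rw [hLmb]
    rcases List.mem_cons.mp (by simpa using hy : y ∈ |x| :: t.map (fun y => |y|)) with h | hy'
    · rw [h]; exact (PySem.List.foldl_min_le (t.map (fun y => |y|)) |x|).1
    · exact (PySem.List.foldl_min_le (t.map (fun y => |y|)) |x|).2 y hy'
  -- B's boundary search
  set r := pvBisect s 0 s.length with hr
  obtain ⟨hrle, hrneg, hrpos⟩ :=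
    pv_bisect_spec s hmono s.length 0 s.length (by omega) (by omega) (le_refl _)
      (by omega) (by intro i h1 h2; omega)
  -- B's candidate minimum
  set MB := (PySem.List.min? ((if r < s.length then [PySem.List.pyGetD s (r : Int) 0] else []) ++
      (if 0 < r then [-(PySem.List.pyGetD s ((r : Int) - 1) 0)] else [])) (fun y => y)).getD 0 with hMB
  have hmb : MB = Lmb := by
    have hgr : r < s.length → PySem.List.pyGetD s (r : Int) 0 = s.getD r 0 := by
      intro _; exact PySem.List.pyGetD_natCast s r 0
    have hgr1 : 0 < r → PySem.List.pyGetD s ((r : Int) - 1) 0 = s.getD (r - 1) 0 := by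
      intro h0
      have : (r : Int) - 1 = ((r - 1 : Nat) : Int) := by omega
      rw [this]; exact PySem.List.pyGetD_natCast s (r - 1) 0
    -- each candidate is an |s[i]|, and MB is below every |s[i]|
    have hub : ∀ i, i < s.length → MB ≤ |s.getD i 0| := by
      intro i hi
      rcases Nat.lt_or_ge i r with hlt | hge
      · -- negative side: |s[i]| = -s[i] ≥ -s[r-1]
        have h0 : 0 < r := by omega
        have hneg := hrneg i hlt
        have habsi : |s.getD i 0| = -(s.getD i 0) := abs_of_neg hneg
        have hle1 : s.getD i 0 ≤ s.getD (r - 1) 0 := hmono i (r - 1) (by omega) (by omega)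
        have hMBle : MB ≤ -(s.getD (r - 1) 0) := by
          rw [hMB]
          by_cases hrl : r < s.length
          · simp only [hrl, h0, if_true, List.singleton_append]
            rw [hgr hrl, hgr1 h0, PySem.List.min?_id_cons]
            simp [List.foldl]
          · simp only [hrl, h0, if_true, if_false, List.nil_append]
            rw [hgr1 h0, PySem.List.min?_id_cons]
            simp [List.foldl]
        calc MB ≤ -(s.getD (r - 1) 0) := hMBle
          _ ≤ -(s.getD i 0) := by omega
          _ = |s.getD i 0| := habsi.symm
      · -- non-negative side: |s[i]| = s[i] ≥ s[r]
        have hrl : r < s.length := by omega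
        have hpos := hrpos i hge hi
        have habsi : |s.getD i 0| = s.getD i 0 := abs_of_nonneg hpos
        have hle1 : s.getD r 0 ≤ s.getD i 0 := hmono r i hge hi
        have hMBle : MB ≤ s.getD r 0 := by
          rw [hMB]
          by_cases h0 : 0 < r
          · simp only [hrl, h0, if_true, List.singleton_append]
            rw [hgr hrl, hgr1 h0, PySem.List.min?_id_cons]
            simp [List.foldl]
          · simp only [hrl, h0, if_true, if_false, List.append_nil]
            rw [hgr hrl, PySem.List.min?_id_cons]
            simp [List.foldl]
        calc MB ≤ s.getD r 0 := hMBle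
          _ ≤ s.getD i 0 := hle1
          _ = |s.getD i 0| := habsi.symm
    have hubm : ∀ y ∈ s.map (fun y => |y|), MB ≤ y := by
      intro y hy
      obtain ⟨z, hz, rfl⟩ := List.mem_map.mp hy
      obtain ⟨i, hi, hiz⟩ := List.mem_iff_getElem.mp hz
      have : s.getD i 0 = z := by rw [List.getD_eq_getElem s 0 hi, hiz]
      rw [← this]
      exact hub i hi
    have hmemMB : MB ∈ s.map (fun y => |y|) := by
      have habs_at : ∀ i, i < s.length → |s.getD i 0| ∈ s.map (fun y => |y|) := by
        intro i hi
        rw [List.getD_eq_getElem s 0 hi]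
        exact List.mem_map.mpr ⟨s[i], List.getElem_mem hi, rfl⟩
      have hmr : 0 < r → -(s.getD (r - 1) 0) = |s.getD (r - 1) 0| := by
        intro h0; rw [abs_of_neg (hrneg (r - 1) (by omega))]
      have hmr2 : r < s.length → s.getD r 0 = |s.getD r 0| := by
        intro hrl; rw [abs_of_nonneg (hrpos r (le_refl _) hrl)]
      rw [hMB]
      by_cases hrl : r < s.length
      · by_cases h0 : 0 < r
        · simp only [hrl, h0, if_true, List.singleton_append]
          rw [hgr hrl, hgr1 h0, PySem.List.min?_id_cons]
          simp only [List.foldl, Option.getD_some]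
          rcases min_choice (s.getD r 0) (-(s.getD (r - 1) 0)) with h | h <;> rw [h]
          · rw [hmr2 hrl]; exact habs_at r hrl
          · rw [hmr h0]; exact habs_at (r - 1) (by omega)
        · simp only [hrl, h0, if_true, if_false, List.append_nil]
          rw [hgr hrl, PySem.List.min?_id_cons]
          simp only [List.foldl, Option.getD_some]
          rw [hmr2 hrl]; exact habs_at r hrl
      · have h0 : 0 < r := by omega
        simp only [hrl, h0, if_true, if_false, List.nil_append]
        rw [hgr1 h0, PySem.List.min?_id_cons]
        simp only [List.foldl, Option.getD_some]
        rw [hmr h0]; exact habs_at (r - 1) (by omega)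
    exact pv_min_unique (s.map (fun y => |y|)) MB Lmb hmemMB hubm hLbmem hLble
  rw [hmn, hmx, hmb]
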